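-- pv_equiv track=rewrite | github.com/chuckjewell/roam-code | src/roam/commands/cmd_coverage_gaps.py | _bfs_to_gate
-- ===== SOURCE A (Python) =====
-- def _bfs_to_gate(adj, start_id, gates, max_depth):
--     """BFS from start_id to find shortest path to any gate symbol.
--
--     Returns (gate_name, depth, chain) or (None, None, None) if not found.
--     """
--     if start_id in gates:
--         return start_id, 0, [start_id]
--
--     visited = {start_id}
--     # Queue entries: (node_id, depth, path)
--     queue = [(start_id, 0, [start_id])]
--
--     while queue:
--         current, depth, path = queue.pop(0)
--         if depth >= max_depth:
--             continue
--         for neighbor in adj.get(current, set()):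
--             if neighbor in visited:
--                 continue
--             visited.add(neighbor)
--             new_path = path + [neighbor]
--             if neighbor in gates:
--                 return neighbor, depth + 1, new_path
--             queue.append((neighbor, depth + 1, new_path))
--
--     return None, None, None
-- ===== SOURCE B (Python) =====
-- def _bfs_to_gate(adj, start_id, gates, max_depth):
--     """Level-synchronous BFS: expand whole depth layers (frontier lists) instead
--     of a FIFO queue of (node, depth, path) tuples; a parents map replaces the
--     per-entry path copies, and the chain is reconstructed when a gate is hit."""
--     if start_id in gates:
--         return start_id, 0, [start_id]
--
--     parents = {start_id: None}
--     frontier = [start_id]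
--     depth = 0
--
--     while frontier and depth < max_depth:
--         next_frontier = []
--         for current in frontier:
--             for neighbor in adj.get(current, set()):
--                 if neighbor in parents:
--                     continue
--                 parents[neighbor] = current
--                 if neighbor in gates:
--                     chain = []
--                     node = neighbor
--                     while node is not None:
--                         chain.append(node)
--                         node = parents[node]
--                     return neighbor, depth + 1, chain[::-1]
--                 next_frontier.append(neighbor)
--         frontier = next_frontier
--         depth += 1
--
--     return None, None, None
-- ===== Notes on version B (the rewrite author's own statement) =====
-- stated objective: alternative
-- what changed: A's FIFO queue of (node, depth, path) tuples is replaced by a level-synchronous BFS: an outer loop over depth layers expands a plain frontier list into the next one, a parents map replaces the per-entry path copies, and the chain is reconstructed by walking parents back from the gate.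
import Mathlib
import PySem

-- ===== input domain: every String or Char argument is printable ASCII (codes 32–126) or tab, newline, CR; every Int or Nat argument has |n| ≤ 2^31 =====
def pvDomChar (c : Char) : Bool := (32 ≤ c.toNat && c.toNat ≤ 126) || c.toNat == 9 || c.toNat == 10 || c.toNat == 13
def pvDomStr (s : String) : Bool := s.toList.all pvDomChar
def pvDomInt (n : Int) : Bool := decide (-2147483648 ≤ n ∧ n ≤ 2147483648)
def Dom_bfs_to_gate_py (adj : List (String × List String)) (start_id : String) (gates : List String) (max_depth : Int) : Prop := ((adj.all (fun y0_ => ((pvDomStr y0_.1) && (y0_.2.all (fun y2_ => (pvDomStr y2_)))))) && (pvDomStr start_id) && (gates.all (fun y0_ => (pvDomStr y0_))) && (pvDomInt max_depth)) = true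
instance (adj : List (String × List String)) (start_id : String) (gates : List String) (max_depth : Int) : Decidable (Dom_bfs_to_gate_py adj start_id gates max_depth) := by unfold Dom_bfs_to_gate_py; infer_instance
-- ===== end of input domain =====

-- B replaces A's FIFO queue of (node, depth, path) tuples by a level-synchronous BFS over depth layers with a parents map and path reconstruction; return values proved equal.


-- ===== PORT A =====
-- the 'for neighbor in adj.get(current, set())' body with its early return:
-- Sum.inl = the function returned, Sum.inr = updated (visited, queue)
def bfsA_inner (gates : List String) (depth : Int) (path : List String) :
    List String → PySem.Set String → List (String × Int × List String) →
    (Option String × Option Int × Option (List String)) ⊕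
      (PySem.Set String × List (String × Int × List String))
  | [], visited, queue => Sum.inr (visited, queue)
  | n :: ns, visited, queue =>
    if PySem.Set.contains visited n then bfsA_inner gates depth path ns visited queue
    else
      let visited' := PySem.Set.add visited n
      let new_path := path ++ [n]
      if gates.contains n then Sum.inl (some n, some (depth + 1), some new_path)
      else bfsA_inner gates depth path ns visited' (queue ++ [(n, depth + 1, new_path)])

-- the 'while queue' loop; fuel bounds the number of pops (one pop per unit),
-- and is chosen large enough that it never runs out (≤ 1 + total enqueues)
def bfsA_loop (adj : PySem.Dict String (List String)) (gates : List String) (max_depth : Int) :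
    Nat → PySem.Set String → List (String × Int × List String) →
    Option String × Option Int × Option (List String)
  | _, _, [] => (none, none, none)
  | 0, _, _ :: _ => (none, none, none)
  | fuel + 1, visited, (current, depth, path) :: rest =>
    if depth ≥ max_depth then bfsA_loop adj gates max_depth fuel visited rest
    else
      match bfsA_inner gates depth path (adj.getD current []) visited rest with
      | Sum.inl r => r
      | Sum.inr (visited', queue') => bfsA_loop adj gates max_depth fuel visited' queue'

def bfs_to_gate_py (adj : List (String × List String)) (start_id : String) (gates : List String) (max_depth : Int) : Option String × Option Int × Option (List String) :=
  if gates.contains start_id then (some start_id, some 0, some [start_id])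
  else
    bfsA_loop (PySem.Dict.mk adj) gates max_depth
      ((adj.map (fun p => p.2.length)).sum + 1)
      (PySem.Set.ofList [start_id]) [(start_id, 0, [start_id])]

-- ===== PORT B =====
-- the 'while node is not None' reconstruction walk (chain.append(node); node = parents[node]);
-- fuel := len(parents) bounds the steps (lookups succeed on reachable states)
def bfsB_walk (parents : PySem.Dict String (Option String)) :
    Nat → Option String → List String → List String
  | _, none, chain => chain
  | 0, some _, chain => chain
  | f + 1, some n, chain => bfsB_walk parents f (parents.getD n none) (chain ++ [n])

-- the 'for neighbor in adj.get(current, set())' body; Sum.inl = the function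
-- returned, Sum.inr = updated (parents, next_frontier)
def bfsB_nbrs (gates : List String) (current : String) (depth : Int) :
    List String → PySem.Dict String (Option String) → List String →
    (Option String × Option Int × Option (List String)) ⊕
      (PySem.Dict String (Option String) × List String)
  | [], parents, nxt => Sum.inr (parents, nxt)
  | n :: ns, parents, nxt =>
    if (parents.get? n).isSome then bfsB_nbrs gates current depth ns parents nxt
    else
      let parents' := parents.insert n (some current)
      if gates.contains n then
        Sum.inl (some n, some (depth + 1),
          some ((bfsB_walk parents' parents'.size (some n) []).reverse))
      else bfsB_nbrs gates current depth ns parents' (nxt ++ [n])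

-- the 'for current in frontier' pass, building next_frontier
def bfsB_level (adj : PySem.Dict String (List String)) (gates : List String) (depth : Int) :
    List String → PySem.Dict String (Option String) → List String →
    (Option String × Option Int × Option (List String)) ⊕
      (PySem.Dict String (Option String) × List String)
  | [], parents, nxt => Sum.inr (parents, nxt)
  | c :: cs, parents, nxt =>
    match bfsB_nbrs gates c depth (adj.getD c []) parents nxt with
    | Sum.inl r => Sum.inl r
    | Sum.inr (parents', nxt') => bfsB_level adj gates depth cs parents' nxt'

-- the 'while frontier and depth < max_depth' loop over depth layers; fuel bounds
-- the number of layers and is chosen large enough that it never runs out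
def bfsB_loop (adj : PySem.Dict String (List String)) (gates : List String) (max_depth : Int) :
    Nat → PySem.Dict String (Option String) → List String → Int →
    Option String × Option Int × Option (List String)
  | _, _, [], _ => (none, none, none)
  | 0, _, _ :: _, _ => (none, none, none)
  | fuel + 1, parents, f :: fs, depth =>
    if depth < max_depth then
      match bfsB_level adj gates depth (f :: fs) parents [] with
      | Sum.inl r => r
      | Sum.inr (parents', nxt) => bfsB_loop adj gates max_depth fuel parents' nxt (depth + 1)
    else (none, none, none)

def bfs_to_gate_py_alt (adj : List (String × List String)) (start_id : String) (gates : List String) (max_depth : Int) : Option String × Option Int × Option (List String) :=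
  if gates.contains start_id then (some start_id, some 0, some [start_id])
  else
    bfsB_loop (PySem.Dict.mk adj) gates max_depth
      ((adj.map (fun p => p.2.length)).sum + 1)
      (PySem.Dict.mk [(start_id, (none : Option String))]) [start_id] 0

-- ===== PRECONDITION & SPEC =====
def Spec_bfs_to_gate_py (adj : List (String × List String)) (start_id : String) (gates : List String) (max_depth : Int) (out : Option String × Option Int × Option (List String)) : Prop := out = bfs_to_gate_py_alt adj start_id gates max_depth
instance (adj : List (String × List String)) (start_id : String) (gates : List String) (max_depth : Int) (out : Option String × Option Int × Option (List String)) : Decidable (Spec_bfs_to_gate_py adj start_id gates max_depth out) := by unfold Spec_bfs_to_gate_py; infer_instance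

-- ===== CLAIM (what is proved, stated in full; the proofs are below) =====
def Claim_equal_bfs_to_gate_py : Prop := ∀ (adj : List (String × List String)) (start_id : String) (gates : List String) (max_depth : Int), Dom_bfs_to_gate_py adj start_id gates max_depth → Spec_bfs_to_gate_py adj start_id gates max_depth (bfs_to_gate_py adj start_id gates max_depth)

-- ===== LEMMAS AND PROOFS =====

-- 'PVReaches ps n p': walking the parents map back from n yields (reversed) the path p,
-- which starts at the BFS start node and ends with n.
inductive PVReaches (ps : PySem.Dict String (Option String)) : String → List String → Prop
  | start (n : String) (h : ps.get? n = some none) : PVReaches ps n [n]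
  | step (n m : String) (p : List String) (h : ps.get? n = some (some m))
      (hm : PVReaches ps m p) : PVReaches ps n (p ++ [n])

def PVGood (ps : PySem.Dict String (Option String)) (n : String) (p : List String) : Prop :=
  PVReaches ps n p ∧ p.Nodup ∧ ∀ x ∈ p, (ps.get? x).isSome

lemma pv_reaches_insert {ps : PySem.Dict String (Option String)} {k : String} {v : Option String}
    (hk : ps.get? k = none) {n : String} {p : List String}
    (h : PVReaches ps n p) : PVReaches (ps.insert k v) n p := by
  induction h with
  | start n h =>
    have hne : n ≠ k := by rintro rfl; simp [hk] at h
    exact PVReaches.start n (by rw [PySem.Dict.get?_insert]; simp [hne, h])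
  | step n m p h hm ih =>
    have hne : n ≠ k := by rintro rfl; simp [hk] at h
    exact PVReaches.step n m p (by rw [PySem.Dict.get?_insert]; simp [hne, h]) ih

lemma pv_good_insert {ps : PySem.Dict String (Option String)} {k : String} {v : Option String}
    (hk : ps.get? k = none) {n : String} {p : List String}
    (h : PVGood ps n p) : PVGood (ps.insert k v) n p := by
  obtain ⟨hr, hnd, hmem⟩ := h
  refine ⟨pv_reaches_insert hk hr, hnd, fun x hx => ?_⟩
  have hx' := hmem x hx
  have hne : x ≠ k := by rintro rfl; simp [hk] at hx'
  rw [PySem.Dict.get?_insert]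
  simp [hne, hx']

lemma pv_walk_none (ps : PySem.Dict String (Option String)) :
    ∀ (f : Nat) (chain : List String), bfsB_walk ps f none chain = chain := by
  intro f chain; cases f <;> rfl

lemma pv_walk_reaches {ps : PySem.Dict String (Option String)} {n : String} {p : List String}
    (h : PVReaches ps n p) :
    ∀ (f : Nat) (acc : List String), p.length ≤ f →
      bfsB_walk ps f (some n) acc = acc ++ p.reverse := by
  induction h with
  | start n h =>
    intro f acc hf
    cases f with
    | zero => simp at hf
    | succ g =>
      have hd : ps.getD n none = none := by simp [PySem.Dict.getD_eq_get?_getD, h]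
      rw [show bfsB_walk ps (g + 1) (some n) acc
            = bfsB_walk ps g (ps.getD n none) (acc ++ [n]) from rfl, hd, pv_walk_none]
      simp
  | step n m p h hm ih =>
    intro f acc hf
    cases f with
    | zero => simp at hf
    | succ g =>
      have hd : ps.getD n none = some m := by simp [PySem.Dict.getD_eq_get?_getD, h]
      rw [show bfsB_walk ps (g + 1) (some n) acc
            = bfsB_walk ps g (ps.getD n none) (acc ++ [n]) from rfl, hd,
        ih g (acc ++ [n]) (by simp at hf; omega)]
      simp

lemma pv_good_length_le {ps : PySem.Dict String (Option String)} {n : String} {p : List String}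
    (h : PVGood ps n p) : p.length ≤ ps.size := by
  obtain ⟨-, hpnd, hmem⟩ := h
  have hsub : p ⊆ ps.keys := by
    intro x hx
    have := hmem x hx
    rw [← PySem.Dict.contains_eq_isSome_get?] at this
    rwa [PySem.Dict.contains_iff_mem_keys] at this
  calc p.length ≤ ps.keys.length := (List.subperm_of_subset hpnd hsub).length_le
    _ = ps.size := by simp [PySem.Dict.keys, PySem.Dict.size]

-- keys bound: a nodup key list contained in W has length ≤ |W|
lemma pv_size_le {ps : PySem.Dict String (Option String)} {W : List String}
    (hnd : ps.keys.Nodup) (hW : ∀ x ∈ ps.keys, x ∈ W) : ps.size ≤ W.length := by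
  calc ps.size = ps.keys.length := by simp [PySem.Dict.keys, PySem.Dict.size]
    _ ≤ W.length := (List.subperm_of_subset hnd hW).length_le

-- every value looked up in (Dict.mk adj) is one of adj's value lists
lemma pv_get?_mk_mem_values : ∀ (adj : List (String × List String)) (c : String)
    (v : List String), (PySem.Dict.mk adj).get? c = some v → v ∈ adj.map Prod.snd := by
  intro adj
  induction adj with
  | nil => intro c v h; exact absurd h (by simp [show (PySem.Dict.mk ([] : List (String × List String))).get? c = none from rfl])
  | cons kv rest ih =>
    intro c v h
    obtain ⟨k, vs⟩ := kv
    rw [PySem.Dict.get?_mk_cons] at h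
    by_cases hk : (k == c) = true
    · rw [if_pos hk] at h
      simp at h
      simp [h]
    · rw [if_neg hk] at h
      simpa using Or.inr (ih c v h)

lemma pv_getD_mk_mem : ∀ (adj : List (String × List String)) (c n : String),
    n ∈ (PySem.Dict.mk adj).getD c [] → n ∈ (adj.map Prod.snd).flatten := by
  intro adj c n hn
  rw [PySem.Dict.getD_eq_get?_getD] at hn
  cases h : (PySem.Dict.mk adj).get? c with
  | none => rw [h] at hn; simp at hn
  | some v =>
    rw [h] at hn
    simp only [Option.getD_some] at hn
    exact List.mem_flatten.mpr ⟨v, pv_get?_mk_mem_values adj c v h, hn⟩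

-- draining A's queue: once every queued entry has depth ≥ max_depth, A pops them
-- all (one fuel unit each) and returns (none, none, none)
lemma pv_drain (adj : PySem.Dict String (List String)) (gates : List String) (max_depth : Int) :
    ∀ (q : List (String × Int × List String)) (visited : PySem.Set String) (fuel : Nat),
      (∀ e ∈ q, e.2.1 ≥ max_depth) → q.length ≤ fuel →
      bfsA_loop adj gates max_depth fuel visited q = (none, none, none) := by
  intro q
  induction q with
  | nil => intro visited fuel _ _; cases fuel <;> rfl
  | cons e rest ih =>
    intro visited fuel hd hf
    obtain ⟨c, d, p⟩ := e
    cases fuel with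
    | zero => simp at hf
    | succ f =>
      have : d ≥ max_depth := hd (c, d, p) List.mem_cons_self
      rw [show bfsA_loop adj gates max_depth (f + 1) visited ((c, d, p) :: rest)
            = if d ≥ max_depth then bfsA_loop adj gates max_depth f visited rest
              else _ from rfl, if_pos this]
      exact ih visited f (fun e he => hd e (List.mem_cons_of_mem _ he)) (by simp at hf; omega)

-- one node's neighbour scan: A's bfsA_inner (appending (node, d+1, path)to the whole
-- remaining queue) and B's bfsB_nbrs (appending the node to next_frontier) stay in sync
lemma pv_nbrs_sim (W gates : List String) (c : String) (d : Int) (p : List String) :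
    ∀ (ns : List String) (visited : PySem.Set String)
      (ps : PySem.Dict String (Option String))
      (tail : List (String × Int × List String)) (nxt : List String),
      (∀ x, x ∈ visited ↔ (ps.get? x).isSome) → ps.keys.Nodup →
      (∀ x ∈ ps.keys, x ∈ W) → (∀ n ∈ ns, n ∈ W) → PVGood ps c p →
      (∀ e ∈ tail, PVGood ps e.1 e.2.2) →
      (∃ r, bfsA_inner gates d p ns visited tail = Sum.inl r ∧
            bfsB_nbrs gates c d ns ps nxt = Sum.inl r) ∨
      (∃ visited' ps' eNew,
            bfsA_inner gates d p ns visited tail = Sum.inr (visited', tail ++ eNew) ∧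
            bfsB_nbrs gates c d ns ps nxt = Sum.inr (ps', nxt ++ eNew.map (·.1)) ∧
            (∀ x, x ∈ visited' ↔ (ps'.get? x).isSome) ∧ ps'.keys.Nodup ∧
            (∀ x ∈ ps'.keys, x ∈ W) ∧
            (∀ e ∈ eNew, e.2.1 = d + 1 ∧ PVGood ps' e.1 e.2.2) ∧
            (∀ e ∈ tail, PVGood ps' e.1 e.2.2) ∧ PVGood ps' c p ∧
            ps'.size = ps.size + eNew.length) := by
  intro ns
  induction ns with
  | nil =>
    intro visited ps tail nxt hiff hknd hkW _ hc htail
    exact Or.inr ⟨visited, ps, [], by simp [bfsA_inner], by simp [bfsB_nbrs], hiff, hknd, hkW,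
      by simp, htail, hc, by simp⟩
  | cons n ns ih =>
    intro visited ps tail nxt hiff hknd hkW hnsW hc htail
    by_cases hn : n ∈ visited
    · have hB : (ps.get? n).isSome = true := (hiff n).mp hn
      simpa [bfsA_inner, bfsB_nbrs, hn, hB] using
        ih visited ps tail nxt hiff hknd hkW (fun m hm => hnsW m (List.mem_cons_of_mem _ hm))
          hc htail
    · have hBn : ps.get? n = none := by
        cases hps : ps.get? n with
        | none => rfl
        | some v => exact absurd ((hiff n).mpr (by simp [hps])) hn
      have hB : ¬ (ps.get? n).isSome = true := by simp [hBn]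
      have hc' : PVGood (ps.insert n (some c)) c p := pv_good_insert hBn hc
      have hiff' : ∀ x : String, x ∈ PySem.Set.add visited n ↔
          ((ps.insert n (some c)).get? x).isSome := by
        intro x
        rw [PySem.Set.mem_add, PySem.Dict.get?_insert]
        by_cases hx : x = n
        · simp [hx]
        · simp [hx, hiff x]
      have hknd' : (ps.insert n (some c)).keys.Nodup := PySem.Dict.nodup_keys_insert _ _ _ hknd
      have hkW' : ∀ x ∈ (ps.insert n (some c)).keys, x ∈ W := by
        intro x hx
        rcases (PySem.Dict.mem_keys_insert _ _ _ _).mp hx with hx | hx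
        · exact hx ▸ hnsW n List.mem_cons_self
        · exact hkW x hx
      have hgoodn : PVGood (ps.insert n (some c)) n (p ++ [n]) := by
        refine ⟨PVReaches.step n c p (PySem.Dict.get?_insert_self _ _ _)
          (pv_reaches_insert hBn hc.1), ?_, ?_⟩
        · refine List.Nodup.append hc.2.1 (List.nodup_singleton n) ?_
          intro x hx hx'
          simp only [List.mem_singleton] at hx'
          subst hx'
          have := hc.2.2 x hx
          simp [hBn] at this
        · intro x hx
          rcases List.mem_append.mp hx with hx | hx
          · exact hc'.2.2 x hx
          · simp only [List.mem_singleton] at hx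
            subst hx
            simp [PySem.Dict.get?_insert_self]
      by_cases hg : n ∈ gates
      · left
        refine ⟨(some n, some (d + 1), some (p ++ [n])), ?_, ?_⟩
        · simp [bfsA_inner, hn, hg]
        · have hlen : (p ++ [n]).length ≤ (ps.insert n (some c)).size :=
            pv_good_length_le hgoodn
          have hwalk := pv_walk_reaches hgoodn.1 (ps.insert n (some c)).size [] hlen
          simp [bfsB_nbrs, hBn, hg, hwalk]
      · have hsz : (ps.insert n (some c)).size = ps.size + 1 := by
          rw [PySem.Dict.size_insert]
          have : ps.contains n = false := by
            rw [PySem.Dict.contains_eq_isSome_get?, hBn]; rfl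
          simp [this]
        have htail' : ∀ e ∈ tail ++ [(n, d + 1, p ++ [n])],
            PVGood (ps.insert n (some c)) e.1 e.2.2 := by
          intro e he
          rcases List.mem_append.mp he with he | he
          · exact pv_good_insert hBn (htail e he)
          · simp only [List.mem_singleton] at he
            subst he
            exact hgoodn
        rcases ih (PySem.Set.add visited n) (ps.insert n (some c))
          (tail ++ [(n, d + 1, p ++ [n])]) (nxt ++ [n]) hiff' hknd' hkW'
          (fun m hm => hnsW m (List.mem_cons_of_mem _ hm)) hc' htail' with
          ⟨r, hAr, hBr⟩ | ⟨v', ps', eNew, hAr, hBr, h1, h2, h3, h4, h5, h6, h7⟩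
        · left
          refine ⟨r, ?_, ?_⟩
          · simpa [bfsA_inner, hn, hg] using hAr
          · simpa [bfsB_nbrs, hBn, hg] using hBr
        · right
          refine ⟨v', ps', (n, d + 1, p ++ [n]) :: eNew, ?_, ?_, h1, h2, h3, ?_, ?_, ?_, ?_⟩
          · simpa [bfsA_inner, hn, hg, List.append_assoc] using hAr
          · simpa [bfsB_nbrs, hBn, hg, List.append_assoc] using hBr
          · intro e he
            rcases List.mem_cons.mp he with he | he
            · subst he
              exact ⟨rfl, h5 (n, d + 1, p ++ [n]) (by simp)⟩
            · exact h4 e he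
          · intro e he
            exact h5 e (List.mem_append_left _ he)
          · exact h6
          · simp at h7 ⊢
            omega

-- one whole layer: processing A's depth-d queue prefix, entry by entry, equals B's
-- frontier pass; A consumes exactly one fuel unit per prefix entry
lemma pv_level_sim (adjd : PySem.Dict String (List String)) (W gates : List String)
    (max_depth : Int) (d : Int) (hd : ¬ d ≥ max_depth)
    (hadj : ∀ c n, n ∈ adjd.getD c [] → n ∈ W) :
    ∀ (eF : List (String × Int × List String)) (visited : PySem.Set String)
      (ps : PySem.Dict String (Option String)) (eN : List (String × Int × List String))
      (fuel : Nat),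
      (∀ x, x ∈ visited ↔ (ps.get? x).isSome) → ps.keys.Nodup →
      (∀ x ∈ ps.keys, x ∈ W) →
      (∀ e ∈ eF, e.2.1 = d ∧ PVGood ps e.1 e.2.2) →
      (∀ e ∈ eN, e.2.1 = d + 1 ∧ PVGood ps e.1 e.2.2) →
      (∃ r, bfsA_loop adjd gates max_depth (eF.length + fuel) visited (eF ++ eN) = r ∧
            bfsB_level adjd gates d (eF.map (·.1)) ps (eN.map (·.1)) = Sum.inl r) ∨
      (∃ visited' ps' eN',
            bfsA_loop adjd gates max_depth (eF.length + fuel) visited (eF ++ eN)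
              = bfsA_loop adjd gates max_depth fuel visited' eN' ∧
            bfsB_level adjd gates d (eF.map (·.1)) ps (eN.map (·.1))
              = Sum.inr (ps', eN'.map (·.1)) ∧
            (∀ x, x ∈ visited' ↔ (ps'.get? x).isSome) ∧ ps'.keys.Nodup ∧
            (∀ x ∈ ps'.keys, x ∈ W) ∧
            (∀ e ∈ eN', e.2.1 = d + 1 ∧ PVGood ps' e.1 e.2.2) ∧
            ps'.size + eN.length = ps.size + eN'.length) := by
  intro eF
  induction eF with
  | nil =>
    intro visited ps eN fuel hiff hknd hkW _ hN
    exact Or.inr ⟨visited, ps, eN, by simp, by simp [bfsB_level], hiff, hknd, hkW, hN, rfl⟩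
  | cons e eFrest ih =>
    intro visited ps eN fuel hiff hknd hkW hF hN
    obtain ⟨c, dd, p⟩ := e
    have hdd : d = dd := ((hF (c, dd, p) List.mem_cons_self).1).symm
    subst hdd
    have hA1 : bfsA_loop adjd gates max_depth (((c, d, p) :: eFrest).length + fuel) visited
        (((c, d, p) :: eFrest) ++ eN)
        = match bfsA_inner gates d p (adjd.getD c []) visited (eFrest ++ eN) with
          | Sum.inl r => r
          | Sum.inr (visited', queue') =>
              bfsA_loop adjd gates max_depth (eFrest.length + fuel) visited' queue' := by
      rw [show ((c, d, p) :: eFrest).length + fuel = (eFrest.length + fuel) + 1 by simp; omega]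
      simp only [List.cons_append, bfsA_loop, if_neg hd]
    rcases pv_nbrs_sim W gates c d p (adjd.getD c []) visited ps (eFrest ++ eN)
        (eN.map (·.1)) hiff hknd hkW (fun n hn => hadj c n hn)
        (hF (c, d, p) List.mem_cons_self).2
        (fun e he => by
          rcases List.mem_append.mp he with he | he
          · exact (hF e (List.mem_cons_of_mem _ he)).2
          · exact (hN e he).2) with
      ⟨r, hAr, hBr⟩ | ⟨v', ps', eNew, hAr, hBr, h1, h2, h3, h4, h5, _, h7⟩
    · left
      refine ⟨r, ?_, ?_⟩
      · rw [hA1, hAr]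
      · simp only [List.map_cons, bfsB_level, hBr]
    · have hAstep : bfsA_loop adjd gates max_depth (((c, d, p) :: eFrest).length + fuel) visited
          (((c, d, p) :: eFrest) ++ eN)
          = bfsA_loop adjd gates max_depth (eFrest.length + fuel) v' (eFrest ++ (eN ++ eNew)) := by
        rw [hA1, hAr, List.append_assoc]
      rcases ih v' ps' (eN ++ eNew) fuel h1 h2 h3
          (fun e he => ⟨(hF e (List.mem_cons_of_mem _ he)).1,
            h5 e (List.mem_append_left _ he)⟩)
          (fun e he => by
            rcases List.mem_append.mp he with he | he
            · exact ⟨(hN e he).1, h5 e (List.mem_append_right _ he)⟩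
            · exact h4 e he) with
        ⟨r, hAr2, hBr2⟩ | ⟨v'', ps'', eN', hAr2, hBr2, g1, g2, g3, g4, g5⟩
      · left
        refine ⟨r, by rw [hAstep, hAr2], ?_⟩
        simp only [List.map_cons, bfsB_level, hBr]
        rw [show (eN.map (·.1)) ++ eNew.map (·.1) = (eN ++ eNew).map (·.1) by simp]
        exact hBr2
      · right
        refine ⟨v'', ps'', eN', by rw [hAstep, hAr2], ?_, g1, g2, g3, g4, by simp at g5 h7 ⊢; omega⟩
        simp only [List.map_cons, bfsB_level, hBr]
        rw [show (eN.map (·.1)) ++ eNew.map (·.1) = (eN ++ eNew).map (·.1) by simp]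
        exact hBr2

-- the outer loops: A's pop loop with fuel counting pops vs B's layer loop with
-- fuel counting layers; the arithmetic side conditions keep both fuels sufficient
lemma pv_loop_sim (adjd : PySem.Dict String (List String)) (W gates : List String)
    (max_depth : Int) (hadj : ∀ c n, n ∈ adjd.getD c [] → n ∈ W) :
    ∀ (fB : Nat) (d : Int) (eF : List (String × Int × List String))
      (visited : PySem.Set String) (ps : PySem.Dict String (Option String)) (fA : Nat),
      (∀ x, x ∈ visited ↔ (ps.get? x).isSome) → ps.keys.Nodup →
      (∀ x ∈ ps.keys, x ∈ W) →
      (∀ e ∈ eF, e.2.1 = d ∧ PVGood ps e.1 e.2.2) →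
      fA + ps.size = eF.length + W.length →
      (eF ≠ [] → ¬ d ≥ max_depth → fB + ps.size ≥ W.length + 1) →
      bfsA_loop adjd gates max_depth fA visited eF
        = bfsB_loop adjd gates max_depth fB ps (eF.map (·.1)) d := by
  intro fB
  induction fB with
  | zero =>
    intro d eF visited ps fA hiff hknd hkW hF hfa hbound
    cases eF with
    | nil => cases fA <;> rfl
    | cons e rest =>
      by_cases hd : d ≥ max_depth
      · have hsz := pv_size_le hknd hkW
        rw [pv_drain adjd gates max_depth ((e :: rest)) visited fA
          (fun e' he' => (hF e' he').1 ▸ hd) (by simp at hfa ⊢; omega)]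
        rfl
      · have hsz := pv_size_le hknd hkW
        exact absurd (hbound (by simp) hd) (by omega)
  | succ fB ih =>
    intro d eF visited ps fA hiff hknd hkW hF hfa hbound
    cases eF with
    | nil => cases fA <;> rfl
    | cons e rest =>
      by_cases hd : d ≥ max_depth
      · have hsz := pv_size_le hknd hkW
        rw [pv_drain adjd gates max_depth ((e :: rest)) visited fA
          (fun e' he' => (hF e' he').1 ▸ hd) (by simp at hfa ⊢; omega)]
        simp only [List.map_cons, bfsB_loop, if_neg (by omega : ¬ d < max_depth)]
      · have hsz := pv_size_le hknd hkW
        have hfa2 : fA = (e :: rest).length + (fA - (e :: rest).length) := by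
          simp at hfa ⊢; omega
        rcases pv_level_sim adjd W gates max_depth d hd hadj (e :: rest) visited ps []
            (fA - (e :: rest).length) hiff hknd hkW hF (by simp) with
          ⟨r, hAr, hBr⟩ | ⟨v', ps', eN', hAr, hBr, g1, g2, g3, g4, g5⟩
        · simp only [List.append_nil] at hAr
          rw [hfa2, hAr]
          simp only [List.map_cons, bfsB_loop, if_pos (by omega : d < max_depth)]
          simp only [List.map_cons, List.map_nil] at hBr
          rw [hBr]
        · simp only [List.append_nil] at hAr
          rw [hfa2, hAr]
          simp only [List.map_cons, bfsB_loop, if_pos (by omega : d < max_depth)]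
          simp only [List.map_cons, List.map_nil] at hBr
          rw [hBr]
          simp only [List.length_nil] at g5
          apply ih (d + 1) eN' v' ps' (fA - (e :: rest).length) g1 g2 g3 g4
          · have hs2 := pv_size_le g2 g3
            simp only [List.length_cons] at hfa ⊢
            omega
          · intro hne hd'
            have h1 : 1 ≤ eN'.length := by
              cases eN' with
              | nil => simp at hne
              | cons _ _ => simp
            have hb := hbound (by simp) hd
            omega

-- ===== VERDICT (by name: the statement is the Claim_ definition above) =====
theorem bfs_to_gate_py_spec : Claim_equal_bfs_to_gate_py := by
  intro adj start_id gates max_depth _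
  unfold Spec_bfs_to_gate_py bfs_to_gate_py bfs_to_gate_py_alt
  by_cases hs : gates.contains start_id = true
  · rw [if_pos hs, if_pos hs]
  · rw [if_neg hs, if_neg hs]
    have hWlen : (start_id :: (adj.map Prod.snd).flatten).length
        = (adj.map (fun p => p.2.length)).sum + 1 := by
      simp [List.length_flatten, List.map_map, Function.comp_def]
    have hsz : (PySem.Dict.mk [(start_id, (none : Option String))]).size = 1 := rfl
    have h := pv_loop_sim (PySem.Dict.mk adj) (start_id :: (adj.map Prod.snd).flatten) gates
      max_depth (fun c n hn => List.mem_cons_of_mem _ (pv_getD_mk_mem adj c n hn))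
      ((adj.map (fun p => p.2.length)).sum + 1) 0 [(start_id, (0 : Int), [start_id])]
      (PySem.Set.ofList [start_id]) (PySem.Dict.mk [(start_id, (none : Option String))])
      ((adj.map (fun p => p.2.length)).sum + 1)
      ?_ ?_ ?_ ?_ ?_ ?_
    · simpa using h
    · intro x
      have hofl : PySem.Set.ofList [start_id] = [start_id] := rfl
      rw [hofl]
      constructor
      · intro hx
        simp only [List.mem_singleton] at hx
        simp [PySem.Dict.get?_mk_cons, hx]
      · intro hx
        by_cases hxe : start_id = x
        · simp [hxe]
        · rw [PySem.Dict.get?_mk_cons] at hx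
          simp [hxe,
            show (PySem.Dict.mk ([] : List (String × Option String))).get? x = none from rfl] at hx
    · simp [PySem.Dict.keys_mk]
    · intro x hx
      simp [PySem.Dict.keys_mk] at hx
      simp [hx]
    · intro e he
      simp only [List.mem_singleton] at he
      subst he
      refine ⟨rfl, PVReaches.start start_id (by simp [PySem.Dict.get?_mk_cons]),
        List.nodup_singleton _, ?_⟩
      intro x hx
      simp only [List.mem_singleton] at hx
      simp [PySem.Dict.get?_mk_cons, hx]
    · rw [hsz, hWlen]
      simp only [List.length_cons, List.length_nil]
      omega
    · intro _ _
      rw [hsz, hWlen]
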